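-- pv_equiv track=rewrite | github.com/vivekmahato/mlots_old | mlots/sfa.py | createWord
-- ===== SOURCE A (Python) =====
-- def createWord(numbers, maxF, bits):
--     shortsPerLong = int(round(60 / bits))
--     to = min(len(numbers), maxF)
--     b = int(0)
--     s = 0
--     shiftOffset = 1
--     for i in range(s, (min(to, shortsPerLong + s))):
--         shift = 1
--         for j in range(bits):
--             if (numbers[i] & shift) != 0:
--                 b |= shiftOffset
--             shiftOffset <<= 1
--             shift <<= 1
--     return b
-- ===== SOURCE B (Python) =====
-- def createWord(numbers, maxF, bits):
--     shortsPerLong = int(round(60 / bits))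
--     n = min(len(numbers), maxF, shortsPerLong)
--     b = 0
--     for i in range(n - 1, -1, -1):
--         b = (b << bits) | (numbers[i] & ((1 << bits) - 1))
--     return b
-- ===== Notes on version B (the rewrite author's own statement) =====
-- stated objective: simpler
-- what changed: B drops A's per-bit inner loop and both running shift accumulators: it folds the (at most shortsPerLong) numbers back-to-front Horner-style, masking each number's low `bits` bits in one step (b = (b << bits) | (numbers[i] & ((1 << bits) - 1))).
import Mathlib
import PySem

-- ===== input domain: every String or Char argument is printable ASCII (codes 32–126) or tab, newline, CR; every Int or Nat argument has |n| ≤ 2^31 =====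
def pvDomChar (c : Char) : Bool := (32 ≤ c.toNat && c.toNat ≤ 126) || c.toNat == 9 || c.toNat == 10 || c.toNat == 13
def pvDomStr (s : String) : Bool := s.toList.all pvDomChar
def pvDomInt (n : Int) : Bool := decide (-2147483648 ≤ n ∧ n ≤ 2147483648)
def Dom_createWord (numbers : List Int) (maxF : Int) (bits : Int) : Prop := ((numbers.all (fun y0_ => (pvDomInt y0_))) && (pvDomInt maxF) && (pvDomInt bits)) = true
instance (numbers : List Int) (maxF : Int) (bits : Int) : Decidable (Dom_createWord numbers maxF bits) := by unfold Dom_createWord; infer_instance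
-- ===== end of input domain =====

-- Port A: mlots/sfa.py createWord (per-bit packing loop).  B: same word built back-to-front,
-- Horner-style, masking each number's low `bits` bits in one step — simpler (no inner per-bit
-- loop, no running shift/shiftOffset accumulators).


-- ===== PORT A =====
-- `int(round(60 / bits))`, ported exactly over the integers: round-half-to-even of the rational
-- 60/bits.  Exact for every nonzero |bits| ≤ 2^31: the float 60/bits has absolute error
-- < 60·2⁻⁵³, smaller than the distance 1/(2|bits|) ≥ 2⁻³³ of any non-tie quotient to a
-- half-integer, and exact ties (bits | 120) are represented exactly, so CPython's round
-- half-to-even agrees with the rational one.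
def pvRound60Div (bits : Int) : Int :=
  let f := PySem.Int.floordiv 60 bits
  let r := PySem.Int.mod 60 bits
  if 2 * r.natAbs < bits.natAbs then f
  else if bits.natAbs < 2 * r.natAbs then f + 1
  else if f % 2 = 0 then f else f + 1

-- body of A's inner `for j in range(bits)` loop; state (b, shiftOffset, shift), x = numbers[i]
def pvInnerStep (x : Int) (t : Int × Int × Int) (_j : Int) : Int × Int × Int :=
  (if PySem.Int.band x t.2.2 ≠ 0 then PySem.Int.bor t.1 t.2.1 else t.1,
   t.2.1 <<< (1 : Nat), t.2.2 <<< (1 : Nat))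

-- body of A's outer `for i in range(s, min(to, shortsPerLong + s))` loop; state (b, shiftOffset)
-- (the index i is always in range, so xs[i] is pyGetD with an unused default)
def pvOuterStep (numbers : List Int) (bits : Int) (st : Int × Int) (i : Int) : Int × Int :=
  let inner := (PySem.List.pyRange 0 bits 1).foldl
      (pvInnerStep (PySem.List.pyGetD numbers i 0)) (st.1, st.2, 1)
  (inner.1, inner.2.1)

def createWord (numbers : List Int) (maxF : Int) (bits : Int) : Int :=
  let shortsPerLong := pvRound60Div bits
  let tto := min ((numbers.length : Int)) maxF
  let s : Int := 0
  ((PySem.List.pyRange s (min tto (shortsPerLong + s)) 1).foldl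
      (pvOuterStep numbers bits) (0, 1)).1

-- ===== PORT B =====
-- body of B's loop: b = (b << bits) | (numbers[i] & ((1 << bits) - 1)).  The loop only runs
-- when n > 0, which forces bits ≥ 1, so the shifts are ported as <<< bits.toNat (exact there).
def pvAltStep (numbers : List Int) (bits : Int) (b : Int) (i : Int) : Int :=
  PySem.Int.bor (b <<< bits.toNat)
    (PySem.Int.band (PySem.List.pyGetD numbers i 0) (((1 : Int) <<< bits.toNat) - 1))

def createWord_alt (numbers : List Int) (maxF : Int) (bits : Int) : Int :=
  let shortsPerLong := pvRound60Div bits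
  let n := min (min ((numbers.length : Int)) maxF) shortsPerLong
  (PySem.List.pyRange (n - 1) (-1) (-1)).foldl (pvAltStep numbers bits) 0

-- ===== PRECONDITION & SPEC =====
-- Pre_ excludes exactly bits = 0, on which A (and B) raise ZeroDivisionError at 60 / bits.
def Pre_createWord (numbers : List Int) (maxF : Int) (bits : Int) : Prop := bits ≠ 0
instance (numbers : List Int) (maxF : Int) (bits : Int) : Decidable (Pre_createWord numbers maxF bits) := by unfold Pre_createWord; infer_instance

def pvWitness_createWord : List Int × Int × Int := ([3, -5], 5, 4)

def Spec_createWord (numbers : List Int) (maxF : Int) (bits : Int) (out : Int) : Prop := out = createWord_alt numbers maxF bits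
instance (numbers : List Int) (maxF : Int) (bits : Int) (out : Int) : Decidable (Spec_createWord numbers maxF bits out) := by unfold Spec_createWord; infer_instance

-- ===== CLAIM (what is proved, stated in full; the proofs are below) =====
def Claim_equal_createWord : Prop := ∀ (numbers : List Int) (maxF : Int) (bits : Int), Dom_createWord numbers maxF bits → Pre_createWord numbers maxF bits → Spec_createWord numbers maxF bits (createWord numbers maxF bits)

-- ===== LEMMAS AND PROOFS =====

-- the packed word over the first n entries: Σ_{t<n} 2^(t·k) · (numbers[t] mod 2^k)
def pvS (xs : List Int) (k : Nat) : Nat → Int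
  | 0 => 0
  | n + 1 => pvS xs k n + 2 ^ (n * k) * (PySem.List.pyGetD xs (n : Int) 0 % (2 ^ k : Int))

theorem pvS_nonneg (xs : List Int) (k : Nat) (n : Nat) : 0 ≤ pvS xs k n := by
  induction n with
  | zero => simp [pvS]
  | succ n ih =>
    have h1 : 0 ≤ PySem.List.pyGetD xs (n : Int) 0 % ((2 : Int) ^ k) :=
      Int.emod_nonneg _ (by positivity)
    have h2 : (0 : Int) ≤ 2 ^ (n * k) := by positivity
    simp only [pvS]
    nlinarith

theorem pvS_lt (xs : List Int) (k : Nat) (n : Nat) : pvS xs k n < 2 ^ (n * k) := by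
  induction n with
  | zero => simp [pvS]
  | succ n ih =>
    have h1 : PySem.List.pyGetD xs (n : Int) 0 % ((2 : Int) ^ k) < 2 ^ k :=
      Int.emod_lt_of_pos _ (by positivity)
    have h2 : (0 : Int) < 2 ^ (n * k) := by positivity
    have h3 : ((n + 1) * k) = n * k + k := by ring
    simp only [pvS, h3, pow_add]
    nlinarith

theorem pv_cast_emod (m n : Nat) : ((m % n : Nat) : Int) = (m : Int) % (n : Int) := by
  norm_cast

-- Python % of a negative int, in terms of the bit-complement representative
theorem pv_emod_neg_rep (m : Nat) (q : Int) (hq : 0 < q) :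
    (-(m : Int) - 1) % q = q - 1 - (m : Int) % q := by
  have hmq0 : 0 ≤ (m : Int) % q := Int.emod_nonneg _ (by omega)
  have hmq1 : (m : Int) % q < q := Int.emod_lt_of_pos _ hq
  have hdvd : q ∣ ((-(m : Int) - 1) - (q - 1 - (m : Int) % q)) := by
    refine ⟨-((m : Int) / q) - 1, ?_⟩
    have hdef : (m : Int) % q = (m : Int) - q * ((m : Int) / q) := Int.emod_def _ _
    rw [hdef]; ring
  calc (-(m : Int) - 1) % q = (q - 1 - (m : Int) % q) % q :=
        Int.emod_eq_emod_iff_emod_sub_eq_zero.mpr (Int.emod_eq_zero_of_dvd hdvd)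
    _ = q - 1 - (m : Int) % q := Int.emod_eq_of_lt (by omega) (by omega)

-- x & 2^j, as the j-th slice of x's Python value (exact also for negative x)
theorem pv_band_two_pow (x : Int) (j : Nat) :
    PySem.Int.band x ((2 : Int) ^ j) = x % ((2 : Int) ^ (j + 1)) - x % ((2 : Int) ^ j) := by
  have e1 : ((2 : Int) ^ (j + 1)) = ((2 ^ (j + 1) : Nat) : Int) := by push_cast; ring
  have e0 : ((2 : Int) ^ j) = ((2 ^ j : Nat) : Int) := by push_cast; ring
  by_cases h : 0 ≤ x
  · obtain ⟨m, rfl⟩ : ∃ m : Nat, x = (m : Int) := ⟨x.toNat, (Int.toNat_of_nonneg h).symm⟩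
    rw [e1, e0, PySem.Int.band_natCast, ← pv_cast_emod, ← pv_cast_emod]
    have hand : m &&& 2 ^ j = (decide (m / 2 ^ j % 2 = 1)).toNat * 2 ^ j := by
      rw [Nat.and_two_pow, Nat.testBit_eq_decide_div_mod_eq]
    have hmod : m % 2 ^ (j + 1) = m % 2 ^ j + 2 ^ j * (m / 2 ^ j % 2) := Nat.mod_pow_succ
    rcases Nat.mod_two_eq_zero_or_one (m / 2 ^ j) with h2 | h2
    · have ha : m &&& 2 ^ j = 0 := by rw [hand, h2]; simp
      have hm2 : m % 2 ^ (j + 1) = m % 2 ^ j := by rw [hmod, h2]; ring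
      rw [ha, hm2]; push_cast; ring
    · have ha : m &&& 2 ^ j = 2 ^ j := by rw [hand, h2]; simp
      have hm2 : m % 2 ^ (j + 1) = m % 2 ^ j + 2 ^ j := by rw [hmod, h2]; ring
      rw [ha, hm2]; push_cast; ring
  · set m : Nat := (-x - 1).toNat with hm
    have hx : x = -(m : Int) - 1 := by
      have : ((m : Int)) = -x - 1 := Int.toNat_of_nonneg (by omega)
      omega
    have hb : PySem.Int.band x ((2 : Int) ^ j) = ((2 ^ j - (2 ^ j &&& m) : Nat) : Int) := by
      rw [e0]
      simp only [PySem.Int.band, h, if_false,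
        if_pos (by positivity : (0 : Int) ≤ ((2 ^ j : Nat) : Int)), Int.toNat_natCast, ← hm]
    have hand : 2 ^ j &&& m = (decide (m / 2 ^ j % 2 = 1)).toNat * 2 ^ j := by
      rw [Nat.and_comm, Nat.and_two_pow, Nat.testBit_eq_decide_div_mod_eq]
    have hmod : m % 2 ^ (j + 1) = m % 2 ^ j + 2 ^ j * (m / 2 ^ j % 2) := Nat.mod_pow_succ
    have hr1 : x % ((2 : Int) ^ (j + 1)) = (2 : Int) ^ (j + 1) - 1 - (m : Int) % ((2 : Int) ^ (j + 1)) := by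
      rw [hx]; exact pv_emod_neg_rep m _ (by positivity)
    have hr0 : x % ((2 : Int) ^ j) = (2 : Int) ^ j - 1 - (m : Int) % ((2 : Int) ^ j) := by
      rw [hx]; exact pv_emod_neg_rep m _ (by positivity)
    have hc1 : (m : Int) % ((2 : Int) ^ (j + 1)) = ((m % 2 ^ (j + 1) : Nat) : Int) := by
      rw [e1, pv_cast_emod]
    have hc0 : (m : Int) % ((2 : Int) ^ j) = ((m % 2 ^ j : Nat) : Int) := by
      rw [e0, pv_cast_emod]
    rcases Nat.mod_two_eq_zero_or_one (m / 2 ^ j) with h2 | h2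
    · have ha : 2 ^ j &&& m = 0 := by rw [hand, h2]; simp
      have hm2 : m % 2 ^ (j + 1) = m % 2 ^ j := by rw [hmod, h2]; ring
      rw [hb, ha, hr1, hr0, hc1, hc0, hm2, Nat.sub_zero]
      push_cast; ring
    · have ha : 2 ^ j &&& m = 2 ^ j := by rw [hand, h2]; simp
      have hm2 : m % 2 ^ (j + 1) = m % 2 ^ j + 2 ^ j := by rw [hmod, h2]; ring
      rw [hb, ha, hr1, hr0, hc1, hc0, hm2, Nat.sub_self]
      push_cast; ring

theorem pv_band_two_pow_cases (x : Int) (j : Nat) :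
    PySem.Int.band x ((2 : Int) ^ j) = 0 ∨ PySem.Int.band x ((2 : Int) ^ j) = 2 ^ j := by
  rw [pv_band_two_pow]
  have hq0 : (0 : Int) < 2 ^ j := by positivity
  have h1 : x % ((2 : Int) ^ (j + 1)) % ((2 : Int) ^ j) = x % ((2 : Int) ^ j) :=
    Int.emod_emod_of_dvd _ ⟨2, by ring⟩
  set y := x % ((2 : Int) ^ (j + 1)) with hy
  have hy0 : 0 ≤ y := Int.emod_nonneg _ (by positivity)
  have hy2 : y < 2 ^ (j + 1) := Int.emod_lt_of_pos _ (by positivity)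
  have hdec : y % (2 : Int) ^ j + (2 : Int) ^ j * (y / (2 : Int) ^ j) = y := Int.emod_add_ediv _ _
  have ht0 : 0 ≤ y / (2 : Int) ^ j := Int.ediv_nonneg hy0 (le_of_lt hq0)
  have ht2 : y / (2 : Int) ^ j < 2 := by
    rw [Int.ediv_lt_iff_lt_mul hq0]
    calc y < 2 ^ (j + 1) := hy2
      _ = 2 * 2 ^ j := by ring
  have hcase : y / (2 : Int) ^ j = 0 ∨ y / (2 : Int) ^ j = 1 := by omega
  rcases hcase with h | h <;> rw [h] at hdec
  · left; linarith [h1]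
  · right; linarith [h1]

-- x & (2^k - 1) = x mod 2^k (exact also for negative x)
theorem pv_band_mask (x : Int) (k : Nat) :
    PySem.Int.band x ((2 : Int) ^ k - 1) = x % ((2 : Int) ^ k) := by
  have h21 : (1 : Nat) ≤ 2 ^ k := Nat.one_le_two_pow
  have e0 : ((2 : Int) ^ k) = ((2 ^ k : Nat) : Int) := by push_cast; ring
  have em : ((2 : Int) ^ k - 1) = ((2 ^ k - 1 : Nat) : Int) := by
    rw [Nat.cast_sub h21]; push_cast; ring
  by_cases h : 0 ≤ x
  · obtain ⟨m, rfl⟩ : ∃ m : Nat, x = (m : Int) := ⟨x.toNat, (Int.toNat_of_nonneg h).symm⟩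
    rw [em, e0, PySem.Int.band_natCast, Nat.and_two_pow_sub_one_eq_mod, ← pv_cast_emod]
  · set m : Nat := (-x - 1).toNat with hm
    have hx : x = -(m : Int) - 1 := by
      have : ((m : Int)) = -x - 1 := Int.toNat_of_nonneg (by omega)
      omega
    have hb : PySem.Int.band x ((2 : Int) ^ k - 1) =
        (((2 ^ k - 1) - ((2 ^ k - 1) &&& m) : Nat) : Int) := by
      rw [em]
      simp only [PySem.Int.band, h, if_false,
        if_pos (by positivity : (0 : Int) ≤ ((2 ^ k - 1 : Nat) : Int)), Int.toNat_natCast, ← hm]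
    have hand : (2 ^ k - 1) &&& m = m % 2 ^ k := by
      rw [Nat.and_comm, Nat.and_two_pow_sub_one_eq_mod]
    have hr : x % ((2 : Int) ^ k) = (2 : Int) ^ k - 1 - (m : Int) % ((2 : Int) ^ k) := by
      rw [hx]; exact pv_emod_neg_rep m _ (by positivity)
    have hmlt : m % 2 ^ k < 2 ^ k := Nat.mod_lt _ (by positivity)
    have hc : (m : Int) % ((2 : Int) ^ k) = ((m % 2 ^ k : Nat) : Int) := by
      rw [e0, pv_cast_emod]
    rw [hb, hand, hr, hc, Nat.cast_sub (by omega)]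
    push_cast [Nat.cast_sub h21]
    ring

theorem pv_bor_two_pow (a : Int) (q : Nat) (h0 : 0 ≤ a) (h : a < 2 ^ q) :
    PySem.Int.bor a ((2 : Int) ^ q) = a + 2 ^ q := by
  have e0 : ((2 : Int) ^ q) = ((2 ^ q : Nat) : Int) := by push_cast; ring
  obtain ⟨m, rfl⟩ : ∃ m : Nat, a = (m : Int) := ⟨a.toNat, (Int.toNat_of_nonneg h0).symm⟩
  have hm : m < 2 ^ q := by exact_mod_cast e0 ▸ h
  rw [e0, PySem.Int.bor_of_nonneg (by positivity) (by positivity), Int.toNat_natCast,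
    Int.toNat_natCast]
  have hor : m ||| 2 ^ q = m + 2 ^ q := by
    have h1 := Nat.shiftLeft_add_eq_or_of_lt hm 1
    simp only [Nat.shiftLeft_eq, one_mul] at h1
    rw [Nat.lor_comm]
    omega
  rw [hor]; push_cast; ring

theorem pv_bor_shift (b r : Int) (k : Nat) (hb : 0 ≤ b) (hr0 : 0 ≤ r) (hr : r < 2 ^ k) :
    PySem.Int.bor (b <<< k) r = b * 2 ^ k + r := by
  obtain ⟨m, rfl⟩ : ∃ m : Nat, b = (m : Int) := ⟨b.toNat, (Int.toNat_of_nonneg hb).symm⟩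
  obtain ⟨s, rfl⟩ : ∃ s : Nat, r = (s : Int) := ⟨r.toNat, (Int.toNat_of_nonneg hr0).symm⟩
  have e0 : ((2 : Int) ^ k) = ((2 ^ k : Nat) : Int) := by push_cast; ring
  have hs : s < 2 ^ k := by exact_mod_cast e0 ▸ hr
  have hsh : ((m : Int)) <<< k = ((m <<< k : Nat) : Int) := by
    rw [Int.shiftLeft_eq, Nat.shiftLeft_eq]; push_cast; ring
  rw [hsh, PySem.Int.bor_of_nonneg (by positivity) (by positivity), Int.toNat_natCast,
    Int.toNat_natCast, ← Nat.shiftLeft_add_eq_or_of_lt hs m, Nat.shiftLeft_eq]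
  push_cast; ring

-- A's inner loop from (b, 2^p, 1): it adds 2^p · (x mod 2^j) and advances shiftOffset to 2^(p+j)
theorem pv_innerA (x : Int) (p : Nat) (b : Int) (hb0 : 0 ≤ b) (hb : b < 2 ^ p) (j : Nat) :
    (PySem.List.pyRange 0 (j : Int) 1).foldl (pvInnerStep x) (b, ((2 : Int) ^ p, 1)) =
      (b + 2 ^ p * (x % ((2 : Int) ^ j)), ((2 : Int) ^ (p + j), (2 : Int) ^ j)) := by
  induction j with
  | zero =>
    rw [show ((0 : Nat) : Int) = 0 by norm_num, PySem.List.pyRange_one_eq_nil (le_refl 0)]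
    simp
  | succ j ih =>
    have hcast : ((j + 1 : Nat) : Int) = (j : Int) + 1 := by push_cast; ring
    rw [hcast, PySem.List.pyRange_one_succ_right (by positivity), List.foldl_append, ih]
    have hmj0 : 0 ≤ x % ((2 : Int) ^ j) := Int.emod_nonneg _ (by positivity)
    have hmj1 : x % ((2 : Int) ^ j) < 2 ^ j := Int.emod_lt_of_pos _ (by positivity)
    rcases pv_band_two_pow_cases x j with hc | hc
    · have hmod : x % ((2 : Int) ^ (j + 1)) = x % ((2 : Int) ^ j) := by
        have := pv_band_two_pow x j; omega
      simp only [List.foldl_cons, List.foldl_nil, pvInnerStep, hc, ne_eq,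
        not_true_eq_false, if_false, hmod, Int.shiftLeft_eq, Prod.mk.injEq]
      refine ⟨trivial, by ring, by ring⟩
    · have hmod : x % ((2 : Int) ^ (j + 1)) = x % ((2 : Int) ^ j) + 2 ^ j := by
        have := pv_band_two_pow x j; omega
      have hne : PySem.Int.band x ((2 : Int) ^ j) ≠ 0 := by
        rw [hc]; positivity
      have hb2 : b + 2 ^ p * (x % ((2 : Int) ^ j)) < 2 ^ (p + j) := by
        have hpj : ((2 : Int) ^ (p + j)) = 2 ^ p * 2 ^ j := by rw [pow_add]
        nlinarith [pow_pos (by norm_num : (0 : Int) < 2) p]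
      have hb0 : 0 ≤ b + 2 ^ p * (x % ((2 : Int) ^ j)) := by positivity
      simp only [List.foldl_cons, List.foldl_nil, pvInnerStep, ne_eq, if_pos hne,
        Int.shiftLeft_eq, Prod.mk.injEq]
      rw [pv_bor_two_pow _ _ hb0 hb2, hmod]
      refine ⟨by ring, by ring, by ring⟩

-- A's outer loop computes (pvS n, 2^(n·k))
theorem pv_outerA (numbers : List Int) (k : Nat) (n : Nat) :
    (PySem.List.pyRange 0 (n : Int) 1).foldl (pvOuterStep numbers (k : Int)) (0, 1) =
      (pvS numbers k n, (2 : Int) ^ (n * k)) := by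
  induction n with
  | zero =>
    rw [show ((0 : Nat) : Int) = 0 by norm_num, PySem.List.pyRange_one_eq_nil (le_refl 0)]
    simp [pvS]
  | succ n ih =>
    have hcast : ((n + 1 : Nat) : Int) = (n : Int) + 1 := by push_cast; ring
    rw [hcast, PySem.List.pyRange_one_succ_right (by positivity), List.foldl_append, ih]
    simp only [List.foldl_cons, List.foldl_nil, pvOuterStep]
    rw [pv_innerA _ _ _ (pvS_nonneg numbers k n) (pvS_lt numbers k n) k]
    have hmul : (n + 1) * k = n * k + k := by ring
    simp [pvS, hmul]

-- B's countdown Horner loop computes the same word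
theorem pv_altB (numbers : List Int) (k : Nat) (n : Nat) (b : Int) (hb : 0 ≤ b) :
    (PySem.List.pyRange ((n : Int) - 1) (-1) (-1)).foldl (pvAltStep numbers (k : Int)) b =
      b * 2 ^ (n * k) + pvS numbers k n := by
  induction n generalizing b with
  | zero =>
    rw [show ((0 : Nat) : Int) - 1 = -1 by norm_num, PySem.List.pyRange_neg_one_eq_nil (le_refl _)]
    simp [pvS]
  | succ n ih =>
    have hcast : ((n + 1 : Nat) : Int) - 1 = (n : Int) := by push_cast; ring
    rw [hcast, PySem.List.pyRange_neg_one_cons (by omega), List.foldl_cons]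
    have hstep : pvAltStep numbers (k : Int) b (n : Int) =
        b * 2 ^ k + PySem.List.pyGetD numbers (n : Int) 0 % ((2 : Int) ^ k) := by
      simp only [pvAltStep, Int.toNat_natCast]
      rw [show ((1 : Int) <<< k) = 2 ^ k from by rw [Int.shiftLeft_eq]; ring, pv_band_mask]
      exact pv_bor_shift b _ k hb (Int.emod_nonneg _ (by positivity))
        (Int.emod_lt_of_pos _ (by positivity))
    have hm0 : 0 ≤ PySem.List.pyGetD numbers (n : Int) 0 % ((2 : Int) ^ k) :=
      Int.emod_nonneg _ (by positivity)
    rw [hstep, ih _ (by positivity)]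
    simp only [pvS]
    rw [show (n + 1) * k = n * k + k by ring, pow_add]
    ring

theorem pv_round_nonpos (bits : Int) (h : bits < 0) : pvRound60Div bits ≤ 0 := by
  simp only [pvRound60Div]
  obtain ⟨hr1, hr2⟩ := PySem.Int.mod_neg_bounds (a := 60) h
  have hfm := PySem.Int.floordiv_mul_add_mod 60 bits
  have hf : PySem.Int.floordiv 60 bits < 0 := by nlinarith
  split_ifs <;> omega

-- ===== VERDICT (by name: the statement is the Claim_ definition above) =====
theorem createWord_spec : Claim_equal_createWord := by
  intro numbers maxF bits _hdom hpre
  unfold Spec_createWord createWord createWord_alt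
  simp only [add_zero]
  rcases lt_trichotomy bits 0 with hneg | hz | hpos
  · have hs : pvRound60Div bits ≤ 0 := pv_round_nonpos bits hneg
    rw [PySem.List.pyRange_one_eq_nil (by
        exact le_trans (min_le_right _ _) hs),
      PySem.List.pyRange_neg_one_eq_nil (by
        have := le_trans (min_le_right (min ((numbers.length : Int)) maxF) _) hs; omega)]
    simp
  · exact absurd hz hpre
  · set n := min (min ((numbers.length : Int)) maxF) (pvRound60Div bits) with hn
    by_cases hle : n ≤ 0
    · rw [PySem.List.pyRange_one_eq_nil hle, PySem.List.pyRange_neg_one_eq_nil (by omega)]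
      simp
    · have hpos' : 0 < n := by omega
      obtain ⟨nn, hnn⟩ : ∃ nn : Nat, n = (nn : Int) :=
        ⟨n.toNat, (Int.toNat_of_nonneg (le_of_lt hpos')).symm⟩
      obtain ⟨k, hk⟩ : ∃ k : Nat, bits = (k : Int) :=
        ⟨bits.toNat, (Int.toNat_of_nonneg (le_of_lt hpos)).symm⟩
      rw [hnn, hk, pv_outerA numbers k nn,
        pv_altB numbers k nn 0 (le_refl 0)]
      simp
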